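-- pv_equiv track=rewrite | github.com/cubewise-code/rushti | src/rushti/contention_analyzer.py | _identify_varying_parameters
-- ===== SOURCE A (Python) =====
-- from typing import Any, Dict, List, Optional, Tuple
--
-- def _identify_varying_parameters(
--     task_params: List[Dict[str, Any]],
-- ) -> List[str]:
--     """Identify parameter keys that vary across tasks.
--
--     Filters out constants (keys where all tasks have the same value).
--
--     :param task_params: List of task dicts with 'parameters' field
--     :return: List of varying parameter key names
--     """
--     if not task_params:
--         return []
--
--     # Collect all values per key
--     key_values: Dict[str, set] = {}
--     for task in task_params:
--         for key, value in task["parameters"].items():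
--             if key not in key_values:
--                 key_values[key] = set()
--             key_values[key].add(str(value))
--
--     # Keep only keys with >1 distinct value
--     return [key for key, values in key_values.items() if len(values) > 1]
-- ===== SOURCE B (Python) =====
-- def _identify_varying_parameters(task_params):
--     """Staged re-implementation: pass 1 collects the distinct keys in
--     first-seen order; pass 2 re-scans the tasks once per key, reporting a
--     key as varying iff some later occurrence's str() differs from the
--     first occurrence's str()."""
--     if not task_params:
--         return []
--
--     ordered_keys = list(dict.fromkeys(
--         key for task in task_params for key in task["parameters"]))
--
--     def varies(key):
--         first = None
--         for task in task_params:
--             params = task["parameters"]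
--             if key in params:
--                 v = str(params[key])
--                 if first is None:
--                     first = v
--                 elif v != first:
--                     return True
--         return False
--
--     return [key for key in ordered_keys if varies(key)]
-- ===== Notes on version B (the rewrite author's own statement) =====
-- stated objective: alternative
-- what changed: A builds one big dict of per-key sets of all distinct stringified values in a single pass and filters it; B works in stages: a first pass collects the distinct keys in first-seen order, then for each key it re-scans all tasks, short-circuiting as soon as an occurrence differs from that key's first occurrence (no per-key value collections at all, at the price of one scan per key).
import Mathlib
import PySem

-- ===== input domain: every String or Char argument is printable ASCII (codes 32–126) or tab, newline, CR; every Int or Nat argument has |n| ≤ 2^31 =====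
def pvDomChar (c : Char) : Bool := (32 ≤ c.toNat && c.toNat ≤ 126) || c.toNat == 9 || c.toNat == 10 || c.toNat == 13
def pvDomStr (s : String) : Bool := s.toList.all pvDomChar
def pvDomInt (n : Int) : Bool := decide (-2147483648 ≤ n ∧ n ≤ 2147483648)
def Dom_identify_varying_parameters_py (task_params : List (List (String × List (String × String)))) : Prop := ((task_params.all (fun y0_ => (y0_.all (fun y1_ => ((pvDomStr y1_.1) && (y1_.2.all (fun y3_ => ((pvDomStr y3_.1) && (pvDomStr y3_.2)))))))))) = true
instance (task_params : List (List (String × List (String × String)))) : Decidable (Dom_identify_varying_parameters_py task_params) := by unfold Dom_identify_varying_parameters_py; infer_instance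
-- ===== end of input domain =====

-- B replaces A's single pass building per-key sets of all distinct values by two stages:
-- an ordered distinct-key pass, then one short-circuiting re-scan of the tasks per key
-- (objective: alternative; trades memory for repeated scans).

-- task["parameters"] as a dict: outer task dict, then inner parameter dict, both with
-- Python's duplicate-key overwrite semantics (Dict.ofList); the getD default is unreachable under Pre_.
def pvInner (task : List (String × List (String × String))) : PySem.Dict String String :=
  PySem.Dict.ofList ((PySem.Dict.ofList task).getD "parameters" [])

-- ===== PORT A =====
-- task["parameters"].items()
def pvParamsOf (task : List (String × List (String × String))) : List (String × String) :=
  (pvInner task).items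

-- body of A's inner loop: 'if key not in key_values: key_values[key] = set(); key_values[key].add(str(value))'
def pvStepA (kv : PySem.Dict String (PySem.Set String)) (p : String × String) :
    PySem.Dict String (PySem.Set String) :=
  let kv1 := if kv.contains p.1 then kv else kv.insert p.1 PySem.Set.empty
  kv1.modify p.1 PySem.Set.empty (fun s => PySem.Set.add s p.2)

def identify_varying_parameters_py (task_params : List (List (String × List (String × String)))) : List String :=
  if task_params = [] then []
  else
    let kv := task_params.foldl (fun kv task => (pvParamsOf task).foldl pvStepA kv) PySem.Dict.empty
    (kv.items.filter (fun q => decide (1 < PySem.Set.len q.2))).map (·.1)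

-- ===== PORT B =====
-- B's helper 'varies(key)': scan the tasks, remembering the first occurrence's value,
-- early-return True on the first later occurrence that differs
def pvVariesLoop (key : String) :
    List (List (String × List (String × String))) → Option String → Bool
  | [], _ => false
  | t :: ts, first =>
    match (pvInner t).get? key with        -- 'if key in params: v = str(params[key])'
    | none => pvVariesLoop key ts first
    | some v =>
      match first with
      | none => pvVariesLoop key ts (some v)
      | some f => if v ≠ f then true else pvVariesLoop key ts first

def identify_varying_parameters_py_alt (task_params : List (List (String × List (String × String)))) : List String :=
  if task_params = [] then []
  else
    -- list(dict.fromkeys(key for task in task_params for key in task["parameters"]))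
    let ordered := PySem.List.dedup (task_params.flatMap (fun t => (pvInner t).keys))
    ordered.filter (fun k => pvVariesLoop k task_params none)

-- ===== PRECONDITION & SPEC =====
-- Pre_ excludes exactly the inputs where A raises KeyError: a task dict without the key "parameters".
def Pre_identify_varying_parameters_py (task_params : List (List (String × List (String × String)))) : Prop :=
  (task_params.all (fun task => task.any (fun q => q.1 == "parameters"))) = true
instance (task_params : List (List (String × List (String × String)))) : Decidable (Pre_identify_varying_parameters_py task_params) := by unfold Pre_identify_varying_parameters_py; infer_instance

def pvWitness_identify_varying_parameters_py : (List (List (String × List (String × String)))) :=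
  [[("parameters", [("a", "1"), ("b", "2")])], [("parameters", [("a", "7")])]]

def Spec_identify_varying_parameters_py (task_params : List (List (String × List (String × String)))) (out : List String) : Prop := out = identify_varying_parameters_py_alt task_params
instance (task_params : List (List (String × List (String × String)))) (out : List String) : Decidable (Spec_identify_varying_parameters_py task_params out) := by unfold Spec_identify_varying_parameters_py; infer_instance

-- ===== CLAIM (what is proved, stated in full; the proofs are below) =====
def Claim_equal_identify_varying_parameters_py : Prop := ∀ (task_params : List (List (String × List (String × String)))), Dom_identify_varying_parameters_py task_params → Pre_identify_varying_parameters_py task_params → Spec_identify_varying_parameters_py task_params (identify_varying_parameters_py task_params)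

-- ===== LEMMAS AND PROOFS =====

-- the stringified values key k receives, in order, over a flattened pair list
def pvValsOf (k : String) (L : List (String × String)) : List String :=
  (L.filter (fun p => p.1 == k)).map (·.2)

-- A's nested loops are a fold over the flattened pair list
theorem pvFoldl_flat {σ : Type} (f : σ → (String × String) → σ) :
    ∀ (ts : List (List (String × List (String × String)))) (init : σ),
      ts.foldl (fun acc t => (pvParamsOf t).foldl f acc) init
        = (ts.flatMap pvParamsOf).foldl f init := by
  intro ts
  induction ts with
  | nil => intro init; rfl
  | cons t ts ih => intro init; simp [List.flatMap_cons, List.foldl_append, ih]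

-- one A-step: effect on the key list and on each per-key set
theorem pvStepA_keys (kv : PySem.Dict String (PySem.Set String)) (p : String × String) :
    (pvStepA kv p).keys = PySem.Set.add kv.keys p.1 := by
  unfold pvStepA
  rw [PySem.Set.add_eq_ite]
  by_cases hc : kv.contains p.1 = true
  · have hm : p.1 ∈ kv.keys := (PySem.Dict.contains_iff_mem_keys kv p.1).mp hc
    simp only [hc, if_true, hm, PySem.Dict.keys_modify]
    exact PySem.Dict.keys_insert_of_contains _ _ hc
  · have hc' : kv.contains p.1 = false := by simpa using hc
    have hm : p.1 ∉ kv.keys := fun h => by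
      rw [(PySem.Dict.contains_iff_mem_keys kv p.1).mpr h] at hc'; exact Bool.noConfusion hc'
    simp only [hc', Bool.false_eq_true, if_false, hm, PySem.Dict.keys_modify]
    rw [PySem.Dict.keys_insert_of_contains _ _ (PySem.Dict.contains_insert_self kv p.1 _),
      PySem.Dict.keys_insert_of_not_contains kv _ hc']

theorem pvStepA_getD (kv : PySem.Dict String (PySem.Set String)) (p : String × String)
    (k : String) : (pvStepA kv p).getD k PySem.Set.empty =
      if k = p.1 then PySem.Set.add (kv.getD p.1 PySem.Set.empty) p.2
      else kv.getD k PySem.Set.empty := by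
  unfold pvStepA
  by_cases hc : kv.contains p.1 = true
  · simp only [hc, if_true, PySem.Dict.getD_modify]
  · have hc' : kv.contains p.1 = false := by simpa using hc
    simp only [hc', Bool.false_eq_true, if_false, PySem.Dict.getD_modify, PySem.Dict.getD_insert,
      PySem.Dict.getD_of_not_contains kv _ hc']
    by_cases hk : k = p.1 <;> simp [hk]

theorem pvFoldA_keys (L : List (String × String)) :
    ∀ kv : PySem.Dict String (PySem.Set String),
      (L.foldl pvStepA kv).keys = PySem.Set.update kv.keys (L.map Prod.fst) := by
  induction L with
  | nil => intro kv; rfl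
  | cons p L ih =>
    intro kv
    simp only [List.foldl_cons, List.map_cons]
    rw [ih, show ∀ (s : PySem.Set String) a xs, PySem.Set.update s (a :: xs) = PySem.Set.update (PySem.Set.add s a) xs from fun _ _ _ => rfl, pvStepA_keys]

theorem pvFoldA_getD (L : List (String × String)) :
    ∀ (kv : PySem.Dict String (PySem.Set String)) (k : String),
      (L.foldl pvStepA kv).getD k PySem.Set.empty
        = PySem.Set.update (kv.getD k PySem.Set.empty) (pvValsOf k L) := by
  induction L with
  | nil => intro kv k; rfl
  | cons p L ih =>
    intro kv k
    simp only [List.foldl_cons]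
    rw [ih]
    by_cases hk : p.1 = k
    · have : pvValsOf k (p :: L) = p.2 :: pvValsOf k L := by simp [pvValsOf, hk]
      rw [this, show ∀ (s : PySem.Set String) a xs, PySem.Set.update s (a :: xs) = PySem.Set.update (PySem.Set.add s a) xs from fun _ _ _ => rfl,
        pvStepA_getD, if_pos hk.symm, hk]
    · have : pvValsOf k (p :: L) = pvValsOf k L := by simp [pvValsOf, hk]
      rw [this, pvStepA_getD, if_neg (fun h => hk h.symm)]

-- a nodup-keyed pair list holds at most one pair per key, the one get? finds
theorem pvDict_filter_key (k : String) (l : List (String × String))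
    (h : (l.map Prod.fst).Nodup) :
    ((l.filter (fun p => p.1 == k)).map (·.2))
      = match (PySem.Dict.mk l).get? k with | none => [] | some v => [v] := by
  induction l with
  | nil => rfl
  | cons a l ih =>
    simp only [List.map_cons, List.nodup_cons] at h
    rw [PySem.Dict.get?_mk_cons]
    by_cases ha : a.1 = k
    · simp only [List.filter_cons, ha, beq_self_eq_true, if_true, List.map_cons]
      have : l.filter (fun p => p.1 == k) = [] := by
        apply List.filter_eq_nil_iff.mpr
        intro p hp hbeq
        exact h.1 (by rw [ha, ← eq_of_beq hbeq]; exact List.mem_map_of_mem hp)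
      simp [this]
    · have hb : (a.1 == k) = false := by simpa using ha
      simp only [List.filter_cons, hb, Bool.false_eq_true, if_false]
      rw [ih h.2]

-- the occurrences of key k in one task: [] when absent, [v] when present with value v
theorem pvValsOf_params (k : String) (t : List (String × List (String × String))) :
    pvValsOf k (pvParamsOf t)
      = match (pvInner t).get? k with | none => [] | some v => [v] := by
  have hnd : ((pvInner t).items.map Prod.fst).Nodup := PySem.Dict.nodup_keys_ofList _
  exact pvDict_filter_key k (pvInner t).items hnd

-- B's per-key scan, decoupled from the task list
def pvScan : Option String → List String → Bool
  | _, [] => false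
  | none, v :: vs => pvScan (some v) vs
  | some f, v :: vs => if v ≠ f then true else pvScan (some f) vs

theorem pvScan_append_vals (k : String) (t : List (String × List (String × String)))
    (vs : List String) (first : Option String) :
    pvScan first (pvValsOf k (pvParamsOf t) ++ vs)
      = match (pvInner t).get? k with
        | none => pvScan first vs
        | some v =>
          match first with
          | none => pvScan (some v) vs
          | some f => if v ≠ f then true else pvScan (some f) vs := by
  rw [pvValsOf_params]
  cases hg : (pvInner t).get? k with
  | none => rfl
  | some v =>
    cases first with
    | none => rfl
    | some f =>
      show pvScan (some f) (v :: vs) = _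
      rw [pvScan]

theorem pvVariesLoop_eq_scan (k : String) :
    ∀ (tp : List (List (String × List (String × String)))) (first : Option String),
      pvVariesLoop k tp first = pvScan first (pvValsOf k (tp.flatMap pvParamsOf)) := by
  intro tp
  induction tp with
  | nil => intro first; rfl
  | cons t ts ih =>
    intro first
    rw [List.flatMap_cons, show pvValsOf k (pvParamsOf t ++ ts.flatMap pvParamsOf) = pvValsOf k (pvParamsOf t) ++ pvValsOf k (ts.flatMap pvParamsOf) from by simp [pvValsOf],
      pvScan_append_vals, pvVariesLoop]
    cases hg : (pvInner t).get? k with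
    | none => exact ih first
    | some v =>
      cases first with
      | none => exact ih (some v)
      | some f =>
        by_cases hv : v = f
        · simp only [hv, ne_eq, not_true_eq_false, if_false]; exact ih (some f)
        · simp [hv]

theorem pvScan_some (f : String) (vs : List String) :
    pvScan (some f) vs = vs.any (fun v => v != f) := by
  induction vs with
  | nil => rfl
  | cons v vs ih =>
    rw [pvScan, List.any_cons]
    by_cases h : v = f
    · simp [h, ih]
    · simp [h]

-- a first-occurrence-order set grows beyond its seed exactly when a new distinct value arrives
theorem pvUpdate_len (vs : List String) :
    ∀ (s : PySem.Set String) (v : String), v ∈ s → s ≠ [] →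
      (1 < (PySem.Set.update s vs).length ↔ 1 < s.length ∨ ∃ w ∈ vs, w ≠ v) := by
  induction vs with
  | nil => intro s v hv hs; simp [PySem.Set.update]
  | cons w vs ih =>
    intro s v hv hs
    have hstep : PySem.Set.update s (w :: vs) = PySem.Set.update (PySem.Set.add s w) vs := rfl
    rw [hstep]
    by_cases hw : w ∈ s
    · rw [PySem.Set.add_of_mem hw, ih s v hv hs]
      by_cases hwv : w = v
      · simp [hwv]
      · constructor
        · rintro (h | ⟨x, hx, hxv⟩)
          · exact Or.inl h
          · exact Or.inr ⟨x, List.mem_cons_of_mem _ hx, hxv⟩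
        · rintro (h | ⟨x, hx, hxv⟩)
          · exact Or.inl h
          · rcases List.mem_cons.mp hx with rfl | hx
            · -- x = w ∈ s, w ≠ v: two distinct elements in s
              left
              rcases s with _ | ⟨a, t⟩
              · exact absurd rfl hs
              · rcases t with _ | ⟨b, u⟩
                · simp only [List.mem_singleton] at hv hw
                  exact absurd (hw.trans hv.symm) hxv
                · simp
            · exact Or.inr ⟨x, hx, hxv⟩
    · rw [PySem.Set.add_of_not_mem hw]
      have hwv : w ≠ v := fun h => hw (h ▸ hv)
      have hlen : ∀ (t : PySem.Set String) (xs : List String), t.length ≤ (PySem.Set.update t xs).length := by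
        intro t xs
        induction xs generalizing t with
        | nil => simp [PySem.Set.update]
        | cons x xs ih2 =>
          calc t.length ≤ (PySem.Set.add t x).length := by
                rw [PySem.Set.add_eq_ite]; split <;> simp
            _ ≤ _ := ih2 _
      have h2 : 1 < (s ++ [w]).length := by
        rcases s with _ | ⟨a, t⟩
        · exact absurd rfl hs
        · simp
      constructor
      · intro _; exact Or.inr ⟨w, List.mem_cons_self, hwv⟩
      · intro _
        calc 1 < (s ++ [w]).length := h2
          _ ≤ _ := hlen _ vs

theorem pvScan_none (vs : List String) :
    pvScan none vs = decide (1 < (PySem.Set.ofList vs).length) := by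
  cases vs with
  | nil => rfl
  | cons v vs =>
    rw [pvScan, pvScan_some, PySem.Set.ofList_eq_foldl, List.foldl_cons]
    have h1 : PySem.Set.add ([] : PySem.Set String) v = [v] := rfl
    have h2 : List.foldl PySem.Set.add [v] vs = PySem.Set.update [v] vs := rfl
    rw [h1, h2]
    have hiff := pvUpdate_len vs [v] v (List.mem_singleton.mpr rfl) (by simp)
    cases hb : vs.any (fun w => w != v)
    · have hb' : ∀ x ∈ vs, x = v := by
        intro x hx
        by_contra hne
        have : vs.any (fun w => w != v) = true := List.any_eq_true.mpr ⟨x, hx, by simpa using hne⟩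
        rw [hb] at this; exact Bool.noConfusion this
      symm; simp only [decide_eq_false_iff_not]
      rw [hiff]
      push Not
      refine ⟨by simp, fun x hx => hb' x hx⟩
    · simp only [List.any_eq_true, bne_iff_ne] at hb
      obtain ⟨x, hx, hxv⟩ := hb
      symm; simp only [decide_eq_true_eq]
      exact hiff.mpr (Or.inr ⟨x, hx, hxv⟩)

-- ===== VERDICT (by name: the statement is the Claim_ definition above) =====
theorem identify_varying_parameters_py_spec : Claim_equal_identify_varying_parameters_py := by
  intro tp _ _
  unfold Spec_identify_varying_parameters_py identify_varying_parameters_py identify_varying_parameters_py_alt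
  by_cases htp : tp = []
  · simp [htp]
  · simp only [if_neg htp]
    rw [pvFoldl_flat pvStepA]
    set L := tp.flatMap pvParamsOf with hL
    set kv := L.foldl pvStepA PySem.Dict.empty with hkv
    have hkeys : kv.keys = PySem.Set.ofList (L.map Prod.fst) := by
      rw [hkv, pvFoldA_keys, PySem.Dict.keys_empty, PySem.Set.ofList_eq_foldl]; rfl
    have hnd : kv.keys.Nodup := by rw [hkeys]; exact PySem.Set.nodup_ofList _
    have hgetD : ∀ k, kv.getD k PySem.Set.empty = PySem.Set.ofList (pvValsOf k L) := by
      intro k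
      rw [hkv, pvFoldA_getD, PySem.Dict.getD_empty, PySem.Set.ofList_eq_foldl]; rfl
    have hord : tp.flatMap (fun t => (pvInner t).keys) = L.map Prod.fst := by
      rw [hL, List.map_flatMap]; rfl
    rw [PySem.Dict.items_eq_map_keys kv hnd PySem.Set.empty, List.filter_map, List.map_map]
    simp only [Function.comp_def, List.map_id']
    rw [PySem.List.dedup_eq_ofList, hord, ← hkeys]
    apply List.filter_congr
    intro k _
    rw [pvVariesLoop_eq_scan, pvScan_none, ← hL, ← hgetD k]
    have hcast : (1 < PySem.Set.len (kv.getD k PySem.Set.empty)) ↔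
        1 < (kv.getD k PySem.Set.empty).length := by
      simp only [PySem.Set.len]
      exact_mod_cast Iff.rfl
    simp only [decide_eq_decide]
    exact hcast
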